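-- pv_equiv track=rewrite | github.com/cellargalaxy/script | speaker-diarization/gen_subt_v7/part_detect_vad.py | diffusion
-- ===== SOURCE A (Python) =====
-- def diffusion(tags, tag):
--     for i, _ in enumerate(tags):
--         if i == 0:
--             continue
--         if tags[i - 1] == tag and tags[i] == 0:
--             tags[i] = tag
--
--     for i in range(len(tags) - 2, -1, -1):
--         if tags[i] == 0 and tags[i + 1] == tag:
--             tags[i] = tag
--
--     return tags
-- ===== SOURCE B (Python) =====
-- def diffusion(tags, tag):
--     # One left-to-right sweep over maximal zero runs: a run is overwritten with
--     # tag iff the non-zero value just before it or just after it equals tag.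
--     # Mutates tags in place (like the original) and returns it.
--     n = len(tags)
--     i = 0
--     prev = None
--     while i < n:
--         if tags[i] != 0:
--             prev = tags[i]
--             i += 1
--             continue
--         j = i
--         while j < n and tags[j] == 0:
--             j += 1
--         nxt = tags[j] if j < n else None
--         if prev == tag or nxt == tag:
--             for k in range(i, j):
--                 tags[k] = tag
--         i = j
--     return tags
-- ===== Notes on version B (the rewrite author's own statement) =====
-- stated objective: alternative
-- what changed: Replaces A's two opposite-direction propagation sweeps (forward then backward) with a single left-to-right sweep that detects each maximal run of zeros and overwrites it with tag when the non-zero neighbour before or after the run equals tag.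
import Mathlib
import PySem

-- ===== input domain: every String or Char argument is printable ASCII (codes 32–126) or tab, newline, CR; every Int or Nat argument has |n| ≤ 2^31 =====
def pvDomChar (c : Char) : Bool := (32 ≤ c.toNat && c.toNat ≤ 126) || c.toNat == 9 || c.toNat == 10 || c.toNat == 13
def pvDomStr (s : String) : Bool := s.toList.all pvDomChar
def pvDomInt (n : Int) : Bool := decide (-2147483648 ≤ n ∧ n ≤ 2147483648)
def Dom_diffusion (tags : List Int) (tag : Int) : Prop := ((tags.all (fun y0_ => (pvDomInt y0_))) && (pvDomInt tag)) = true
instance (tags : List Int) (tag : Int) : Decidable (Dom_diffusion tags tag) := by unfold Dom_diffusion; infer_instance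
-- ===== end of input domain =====

-- B replaces A's forward-then-backward propagation sweeps with one run-boundary sweep
-- over maximal zero runs (objective: alternative decomposition, same cost).
-- Equivalence is about the RETURN value only; both Pythons mutate the argument in place.

-- ===== PORT A =====
-- forward pass: for i ≥ 1, if tags[i-1] == tag and tags[i] == 0 then tags[i] = tag,
-- carried as a scan with the (already updated) previous value `prev`.
def fwdGo (tag prev : Int) : List Int → List Int
  | [] => []
  | x :: xs =>
      let x' := if prev = tag ∧ x = 0 then tag else x
      x' :: fwdGo tag x' xs

-- backward pass: for i from n-2 downto 0, if tags[i] == 0 and tags[i+1] == tag then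
-- tags[i] = tag; the processed suffix is the recursive result, tags[i+1] its head.
def bwdGo (tag : Int) : List Int → List Int
  | [] => []
  | x :: xs =>
      let ys := bwdGo tag xs
      (if x = 0 ∧ ys.head? = some tag then tag else x) :: ys

def diffusion (tags : List Int) (tag : Int) : List Int :=
  bwdGo tag (match tags with
             | [] => []
             | h :: t => h :: fwdGo tag h t)

-- ===== PORT B =====
-- single sweep: a non-zero element updates `prev`; at a zero, take the maximal zero
-- run (takeWhile) and fill it with tag iff prev or the element after the run is tag.
def altGo (tag : Int) (prev : Option Int) : List Int → List Int
  | [] => []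
  | x :: xs =>
      if hx : x = 0 then
        let zs := List.takeWhile (fun z => z = 0) (x :: xs)
        let rest := List.dropWhile (fun z => z = 0) (x :: xs)
        (if prev = some tag ∨ rest.head? = some tag then List.replicate zs.length tag else zs)
          ++ altGo tag prev rest
      else
        x :: altGo tag (some x) xs
  termination_by l => l.length
  decreasing_by
    · simp only [List.dropWhile_cons, hx, decide_true, if_true]
      exact Nat.lt_succ_of_le (List.length_dropWhile_le _ _)
    · simp

def diffusion_alt (tags : List Int) (tag : Int) : List Int :=
  altGo tag none tags

-- ===== PRECONDITION & SPEC =====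
def Spec_diffusion (tags : List Int) (tag : Int) (out : List Int) : Prop := out = diffusion_alt tags tag
instance (tags : List Int) (tag : Int) (out : List Int) : Decidable (Spec_diffusion tags tag out) := by unfold Spec_diffusion; infer_instance

-- ===== CLAIM (what is proved, stated in full; the proofs are below) =====
def Claim_equal_diffusion : Prop := ∀ (tags : List Int) (tag : Int), Dom_diffusion tags tag → Spec_diffusion tags tag (diffusion tags tag)

-- ===== LEMMAS AND PROOFS =====

-- takeWhile of the zero-run predicate is a run of zeros
theorem takeWhile_zero_decomp (l : List Int) :
    List.takeWhile (fun z => z = 0) l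
      = List.replicate (List.takeWhile (fun z => z = 0) l).length (0 : Int) := by
  apply List.eq_replicate_of_mem
  intro x hx
  simpa using List.mem_takeWhile_imp hx

theorem zero_decomp (l : List Int) :
    l = List.replicate (List.takeWhile (fun z => z = 0) l).length (0 : Int)
          ++ List.dropWhile (fun z => z = 0) l := by
  conv_lhs => rw [← List.takeWhile_append_dropWhile (p := fun z => decide (z = (0:Int))) (l := l)]
  rw [← takeWhile_zero_decomp]

theorem dw_head (l : List Int) (y : Int) (ys : List Int)
    (h : List.dropWhile (fun z => z = 0) l = y :: ys) : y ≠ 0 := by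
  induction l with
  | nil => simp at h
  | cons x xs ih =>
    by_cases hx : x = 0
    · rw [List.dropWhile_cons] at h
      simp [hx] at h
      exact ih h
    · rw [List.dropWhile_cons] at h
      simp [hx] at h
      rw [← h.1]; exact hx

-- ===== fwdGo lemmas =====
theorem fwd_nonzero (tag p y : Int) (ys : List Int) (hy : y ≠ 0) :
    fwdGo tag p (y :: ys) = y :: fwdGo tag y ys := by
  simp [fwdGo, hy]

theorem fwd_zeros_tag (tag : Int) (k : Nat) (ys : List Int) :
    fwdGo tag tag (List.replicate k 0 ++ ys) = List.replicate k tag ++ fwdGo tag tag ys := by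
  induction k with
  | zero => simp
  | succ k ih => simp [List.replicate_succ, fwdGo, ih]

theorem fwd_zero_prev_nil (tag : Int) (k : Nat) :
    fwdGo tag 0 (List.replicate k 0) = List.replicate k 0 := by
  by_cases h0 : tag = 0
  · subst h0
    simpa [fwdGo] using fwd_zeros_tag 0 k []
  · induction k with
    | zero => simp [fwdGo]
    | succ k ih =>
      simp [List.replicate_succ, fwdGo, Ne.symm h0, ih]

theorem fwd_zero_prev (tag : Int) (k : Nat) (y : Int) (ys : List Int) (hy : y ≠ 0) :
    fwdGo tag 0 (List.replicate k 0 ++ y :: ys)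
      = List.replicate k 0 ++ y :: fwdGo tag y ys := by
  by_cases h0 : tag = 0
  · subst h0
    rw [fwd_zeros_tag 0 k (y :: ys), fwd_nonzero 0 0 y ys hy]
  · induction k with
    | zero => simpa using fwd_nonzero tag 0 y ys hy
    | succ k ih =>
      simp [List.replicate_succ, fwdGo, Ne.symm h0] at ih ⊢
      exact ih

theorem fwd_ne_nil (tag p : Int) (k : Nat) (hp : p ≠ tag) :
    fwdGo tag p (List.replicate k 0) = List.replicate k 0 := by
  cases k with
  | zero => simp [fwdGo]
  | succ k =>
    simp [List.replicate_succ, fwdGo, hp]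
    exact fwd_zero_prev_nil tag k

theorem fwd_ne (tag p : Int) (k : Nat) (y : Int) (ys : List Int) (hp : p ≠ tag) (hy : y ≠ 0) :
    fwdGo tag p (List.replicate k 0 ++ y :: ys)
      = List.replicate k 0 ++ y :: fwdGo tag y ys := by
  cases k with
  | zero => simpa using fwd_nonzero tag p y ys hy
  | succ k =>
    simp [List.replicate_succ, fwdGo, hp]
    exact fwd_zero_prev tag k y ys hy

-- ===== bwdGo lemmas =====
theorem bwd_nonzero (tag y : Int) (ys : List Int) (hy : y ≠ 0) :
    bwdGo tag (y :: ys) = y :: bwdGo tag ys := by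
  simp [bwdGo, hy]

theorem bwd_zeros_nil (tag : Int) (k : Nat) :
    bwdGo tag (List.replicate k 0) = List.replicate k 0 := by
  induction k with
  | zero => simp [bwdGo]
  | succ k ih =>
    rw [List.replicate_succ]
    simp only [bwdGo, ih]
    cases k with
    | zero => simp
    | succ k' =>
      by_cases h : tag = 0
      · simp [h, List.replicate_succ]
      · simp [List.replicate_succ, Ne.symm h]

theorem bwd_tag_nil (tag : Int) (k : Nat) :
    bwdGo tag (List.replicate k tag) = List.replicate k tag := by
  induction k with
  | zero => simp [bwdGo]
  | succ k ih =>
    rw [List.replicate_succ]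
    simp only [bwdGo, ih]
    rw [ite_self]

theorem bwd_tag (tag : Int) (k : Nat) (y : Int) (ys : List Int) (hy : y ≠ 0) :
    bwdGo tag (List.replicate k tag ++ y :: ys)
      = List.replicate k tag ++ y :: bwdGo tag ys := by
  induction k with
  | zero => simpa using bwd_nonzero tag y ys hy
  | succ k ih =>
    rw [List.replicate_succ, List.cons_append]
    simp only [bwdGo, ih]
    rw [ite_self, List.cons_append]

theorem bwd_zeros (tag : Int) (k : Nat) (y : Int) (ys : List Int) (hy : y ≠ 0) :
    bwdGo tag (List.replicate k 0 ++ y :: ys)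
      = (if y = tag then List.replicate k tag else List.replicate k 0) ++ y :: bwdGo tag ys := by
  induction k with
  | zero => simpa using bwd_nonzero tag y ys hy
  | succ k ih =>
    rw [List.replicate_succ, List.cons_append]
    simp only [bwdGo, ih]
    by_cases hyt : y = tag
    · simp only [hyt, if_pos rfl] at *
      cases k with
      | zero => simp [List.replicate_succ]
      | succ k' => simp [List.replicate_succ]
    · simp only [if_neg hyt] at *
      cases k with
      | zero => simp [List.replicate_succ, hyt]
      | succ k' =>
        by_cases h0 : tag = 0
        · simp [List.replicate_succ, h0]
        · simp [List.replicate_succ, Ne.symm h0]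

-- ===== run-shape takeWhile/dropWhile =====
theorem tw_run (k : Nat) (y : Int) (ys : List Int) (hy : y ≠ 0) :
    List.takeWhile (fun z => z = 0) (List.replicate k (0:Int) ++ y :: ys)
      = List.replicate k (0:Int) := by
  induction k with
  | zero => simp [List.takeWhile_cons, hy]
  | succ k ih => simp [List.replicate_succ, List.takeWhile_cons, ih]

theorem dw_run (k : Nat) (y : Int) (ys : List Int) (hy : y ≠ 0) :
    List.dropWhile (fun z => z = 0) (List.replicate k (0:Int) ++ y :: ys) = y :: ys := by
  induction k with
  | zero => simp [List.dropWhile_cons, hy]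
  | succ k ih => simp [List.replicate_succ, List.dropWhile_cons, ih]

theorem tw_run_nil (k : Nat) :
    List.takeWhile (fun z => z = 0) (List.replicate k (0:Int)) = List.replicate k (0:Int) := by
  induction k with
  | zero => simp
  | succ k ih => simp [List.replicate_succ, List.takeWhile_cons, ih]

theorem dw_run_nil (k : Nat) :
    List.dropWhile (fun z => z = 0) (List.replicate k (0:Int)) = [] := by
  induction k with
  | zero => simp
  | succ k ih => simp [List.replicate_succ, List.dropWhile_cons, ih]

-- ===== altGo lemmas =====
theorem alt_nonzero (tag : Int) (p : Option Int) (y : Int) (ys : List Int) (hy : y ≠ 0) :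
    altGo tag p (y :: ys) = y :: altGo tag (some y) ys := by
  rw [altGo]
  simp [hy]

theorem alt_run_nil (tag : Int) (p : Option Int) (k : Nat) :
    altGo tag p (List.replicate (k+1) (0:Int))
      = if p = some tag then List.replicate (k+1) tag else List.replicate (k+1) (0:Int) := by
  rw [List.replicate_succ, altGo]
  simp only [dif_pos rfl]
  rw [← List.replicate_succ]
  rw [tw_run_nil (k+1), dw_run_nil (k+1)]
  simp [altGo]

theorem alt_run (tag : Int) (p : Option Int) (k : Nat) (y : Int) (ys : List Int) (hy : y ≠ 0) :
    altGo tag p (List.replicate (k+1) (0:Int) ++ y :: ys)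
      = (if p = some tag ∨ y = tag then List.replicate (k+1) tag else List.replicate (k+1) (0:Int))
          ++ y :: altGo tag (some y) ys := by
  rw [List.replicate_succ, List.cons_append, altGo]
  simp only [dif_pos rfl]
  rw [← List.cons_append, ← List.replicate_succ]
  rw [tw_run (k+1) y ys hy, dw_run (k+1) y ys hy]
  rw [alt_nonzero tag p y ys hy]
  simp [List.length_replicate]

-- ===== main lemma: B's run sweep equals A's two sweeps, given a non-zero previous value =====
theorem main_run (tag : Int) : ∀ (n : Nat) (ys : List Int) (y : Int), y ≠ 0 → ys.length ≤ n →
    bwdGo tag (fwdGo tag y ys) = altGo tag (some y) ys := by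
  intro n
  induction n with
  | zero =>
    intro ys y hy hlen
    have h : ys = [] := List.eq_nil_of_length_eq_zero (Nat.le_zero.mp hlen)
    subst h
    simp [fwdGo, bwdGo, altGo]
  | succ n ih =>
    intro ys y hy hlen
    have hdec := zero_decomp ys
    cases hrest : List.dropWhile (fun z => z = 0) ys with
    | nil =>
      rw [hrest, List.append_nil] at hdec
      set K := (List.takeWhile (fun z => z = 0) ys).length with hK
      rw [hdec]
      by_cases hyt : y = tag
      · subst hyt
        have hf : fwdGo y y (List.replicate K 0) = List.replicate K y := by
          simpa [fwdGo] using fwd_zeros_tag y K []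
        rw [hf, bwd_tag_nil]
        cases K with
        | zero => simp [altGo]
        | succ K' => rw [alt_run_nil]; simp
      · rw [fwd_ne_nil tag y K hyt, bwd_zeros_nil]
        cases K with
        | zero => simp [altGo]
        | succ K' => rw [alt_run_nil]; simp [hyt]
    | cons y' ys' =>
      have hy' : y' ≠ 0 := dw_head ys y' ys' hrest
      rw [hrest] at hdec
      set K := (List.takeWhile (fun z => z = 0) ys).length with hK
      have hlen' : ys'.length ≤ n := by
        have := congrArg List.length hdec
        simp at this
        omega
      have ihr := ih ys' y' hy' hlen'
      rw [hdec]
      by_cases hyt : y = tag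
      · subst hyt
        rw [fwd_zeros_tag y K (y' :: ys'), fwd_nonzero y y y' ys' hy',
            bwd_tag y K y' _ hy', ihr]
        cases K with
        | zero => simpa using (alt_nonzero y (some y) y' ys' hy').symm
        | succ K' => rw [alt_run y (some y) K' y' ys' hy']; simp
      · rw [fwd_ne tag y K y' ys' hyt hy', bwd_zeros tag K y' _ hy', ihr]
        cases K with
        | zero =>
          simp only [List.replicate, List.nil_append, ite_self]
          simpa using (alt_nonzero tag (some y) y' ys' hy').symm
        | succ K' =>
          rw [alt_run tag (some y) K' y' ys' hy']
          simp [hyt]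

theorem diffusion_eq_alt (tags : List Int) (tag : Int) :
    diffusion tags tag = diffusion_alt tags tag := by
  cases tags with
  | nil => simp [diffusion, diffusion_alt, bwdGo, altGo]
  | cons h t =>
    by_cases hh : h = 0
    · subst hh
      show bwdGo tag ((0:Int) :: fwdGo tag 0 t) = altGo tag none ((0:Int) :: t)
      have hdec := zero_decomp t
      cases hrest : List.dropWhile (fun z => z = 0) t with
      | nil =>
        rw [hrest, List.append_nil] at hdec
        set K := (List.takeWhile (fun z => z = 0) t).length with hK
        rw [hdec, fwd_zero_prev_nil tag K]
        have h1 : (0:Int) :: List.replicate K (0:Int) = List.replicate (K+1) (0:Int) := by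
          rw [List.replicate_succ]
        rw [h1, bwd_zeros_nil, alt_run_nil]
        simp
      | cons y ys =>
        have hy : y ≠ 0 := dw_head t y ys hrest
        rw [hrest] at hdec
        set K := (List.takeWhile (fun z => z = 0) t).length with hK
        rw [hdec, fwd_zero_prev tag K y ys hy]
        have h1 : ∀ X : List Int, (0:Int) :: (List.replicate K (0:Int) ++ X)
            = List.replicate (K+1) (0:Int) ++ X := by
          intro X; rw [List.replicate_succ, List.cons_append]
        rw [h1, bwd_zeros tag (K+1) y _ hy,
            main_run tag ys.length ys y hy le_rfl, h1,
            alt_run tag none K y ys hy]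
        simp
    · show bwdGo tag (h :: fwdGo tag h t) = altGo tag none (h :: t)
      rw [bwd_nonzero tag h _ hh, alt_nonzero tag none h t hh,
          main_run tag t.length t h hh le_rfl]

-- ===== VERDICT (by name: the statement is the Claim_ definition above) =====
theorem diffusion_spec : Claim_equal_diffusion := by
  intro tags tag _
  unfold Spec_diffusion
  exact diffusion_eq_alt tags tag
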